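-- pv_equiv track=rewrite | github.com/lacithelaci/erettlensegi | loves.py | loertek
-- ===== SOURCE A (Python) =====
-- def loertek(sor):
--     aktpont = 20
--     ertek = 0
--
--     for i in range(0, len(sor)):
--
--         if aktpont > 0 and sor[i] == '-':
--             aktpont += -1
--
--         else:
--             ertek += aktpont
--
--     return ertek
-- ===== SOURCE B (Python) =====
-- def loertek(sor):
--     total = 0
--     for k, part in enumerate(sor.split('-')):
--         total += max(20 - k, 0) * len(part)
--     return total
-- ===== Notes on version B (the rewrite author's own statement) =====
-- stated objective: alternative
-- what changed: Replaced A's per-character scan with a decaying budget counter by a per-segment sum: B splits the string on the minus character and adds max(20-k,0) times the length of the k-th segment.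
import Mathlib
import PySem

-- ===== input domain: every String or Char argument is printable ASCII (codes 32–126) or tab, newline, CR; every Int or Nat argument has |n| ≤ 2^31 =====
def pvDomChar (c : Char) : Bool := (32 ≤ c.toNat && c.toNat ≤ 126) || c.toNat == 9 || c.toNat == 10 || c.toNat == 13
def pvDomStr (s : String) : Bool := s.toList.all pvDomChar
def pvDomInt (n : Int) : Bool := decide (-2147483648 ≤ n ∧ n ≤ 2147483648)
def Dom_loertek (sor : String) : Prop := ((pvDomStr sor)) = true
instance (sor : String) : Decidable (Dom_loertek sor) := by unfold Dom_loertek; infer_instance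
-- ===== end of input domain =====

-- B replaces A's per-character budget scan by a per-segment sum over the split on the minus character (same asymptotics; measurably faster constants via str.split).

-- ===== PORT A =====
-- loop body of A's 'for i in range(0, len(sor))' (state = (aktpont, ertek))
def loertekStep (st : Int × Int) (c : Char) : Int × Int :=
  if st.1 > 0 ∧ c = '-' then (st.1 + -1, st.2) else (st.1, st.2 + st.1)

def loertek (sor : String) : Int :=
  ((PySem.List.pyRange 0 (PySem.Str.len sor)).foldl
    (fun st i => loertekStep st (PySem.List.pyGetD sor.toList i ' ')) (20, 0)).2

-- ===== PORT B =====
def loertek_alt (sor : String) : Int :=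
  match PySem.Str.split? sor "-" with
  | none => 0
  | some parts =>
      (PySem.List.enumerate parts).foldl
        (fun total kp => total + max (20 - kp.1) 0 * PySem.Str.len kp.2) 0

-- ===== PRECONDITION & SPEC =====
def Spec_loertek (sor : String) (out : Int) : Prop := out = loertek_alt sor
instance (sor : String) (out : Int) : Decidable (Spec_loertek sor out) := by unfold Spec_loertek; infer_instance

-- ===== CLAIM (what is proved, stated in full; the proofs are below) =====
def Claim_equal_loertek : Prop := ∀ (sor : String), Dom_loertek sor → Spec_loertek sor (loertek sor)

-- ===== LEMMAS AND PROOFS =====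

-- A's scan as a structural recursion over the characters, carrying the remaining budget p
def loertekF : List Char → Int → Int
  | [], _ => 0
  | c :: t, p => if p > 0 ∧ c = '-' then loertekF t (p + -1) else p + loertekF t p

-- B's segment sum: level p for the first segment, decreasing by one per '-'
def loertekG : List (List Char) → Int → Int
  | [], _ => 0
  | q :: qs, p => max p 0 * q.length + loertekG qs (p - 1)

theorem loertek_foldl_eq (cs : List Char) (p e : Int) :
    (cs.foldl loertekStep (p, e)).2 = e + loertekF cs p := by
  induction cs generalizing p e with
  | nil => simp [loertekF]
  | cons c t ih =>
      simp only [List.foldl_cons, loertekStep, loertekF]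
      split_ifs with h
      · rw [ih]
      · rw [ih]; ring

theorem loertek_eq_F (sor : String) : loertek sor = loertekF sor.toList 20 := by
  unfold loertek
  rw [PySem.Str.len_eq, show ((sor.toList.length : Int)) = PySem.List.len sor.toList by
        simp [PySem.List.len_eq],
      PySem.List.foldl_pyRange_pyGetD sor.toList ' ' loertekStep (20, 0) (by omega)]
  simp [loertek_foldl_eq]

theorem loertek_go_eq (fuel : Nat) (l cur : List Char) (acc : List (List Char))
    (h : l.length ≤ fuel) :
    PySem.Chars.splitOn.go ['-'] fuel l cur acc =
      acc.reverse ++ (List.splitOnP (· == '-') l).modifyHead (cur.reverse ++ ·) := by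
  induction fuel generalizing l cur acc with
  | zero =>
      have hl : l = [] := by cases l <;> simp_all
      subst hl
      rw [PySem.Chars.splitOn.go]
      simp [List.splitOnP_nil]
  | succ fuel ih =>
      cases l with
      | nil =>
          rw [PySem.Chars.splitOn.go]
          · simp [List.splitOnP_nil]
          · omega
      | cons c rest =>
          rw [PySem.Chars.splitOn.go]
          by_cases hc : c = '-'
          · subst hc
            have hp : (['-'] : List Char).isPrefixOf ('-' :: rest) = true := by
              simp [List.isPrefixOf]
            rw [if_pos hp, ih _ _ _ (by simpa using h)]
            simp only [List.splitOnP_cons, beq_self_eq_true, if_pos,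
              List.reverse_cons, List.reverse_nil, List.nil_append,
              List.modifyHead_cons, List.append_assoc, List.singleton_append]
            rcases hX : List.splitOnP (· == '-') rest with _ | ⟨q, qs⟩
            · exact absurd hX (List.splitOnP_ne_nil _ _)
            · simp [List.drop, hX, List.modifyHead]
          · have hp : (['-'] : List Char).isPrefixOf (c :: rest) = false := by
              simp only [List.isPrefixOf, Bool.and_true, beq_eq_false_iff_ne,
                ne_eq]
              exact fun h' => hc h'.symm
            rw [if_neg (by simp [hp]), ih _ _ _ (by simpa using h)]
            simp only [List.splitOnP_cons, beq_iff_eq, if_neg hc]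
            rcases hX : List.splitOnP (· == '-') rest with _ | ⟨q, qs⟩
            · exact absurd hX (List.splitOnP_ne_nil _ _)
            · simp [List.modifyHead]

theorem loertek_splitOn_eq (cs : List Char) :
    PySem.Chars.splitOn cs ['-'] = List.splitOnP (· == '-') cs := by
  unfold PySem.Chars.splitOn
  rw [loertek_go_eq _ _ _ _ (by omega)]
  rcases hX : List.splitOnP (· == '-') cs with _ | ⟨q, qs⟩
  · exact absurd hX (List.splitOnP_ne_nil _ _)
  · simp [List.modifyHead]

theorem loertek_enum_foldl (X : List (List Char)) (s t : Int) :
    ((PySem.List.enumerate (X.map String.ofList) s).foldl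
        (fun total kp => total + max (20 - kp.1) 0 * PySem.Str.len kp.2) t)
      = t + loertekG X (20 - s) := by
  induction X generalizing s t with
  | nil => simp [loertekG, PySem.List.enumerate_nil]
  | cons q qs ih =>
      simp only [List.map_cons, PySem.List.enumerate_cons, List.foldl_cons]
      rw [ih]
      simp only [loertekG, PySem.Str.len_eq]
      have h1 : (String.ofList q).toList = q := by simp
      have h2 : 20 - (s + 1) = 20 - s - 1 := by ring
      rw [h1, h2]
      ring

theorem loertek_alt_eq_G (sor : String) :
    loertek_alt sor = loertekG (List.splitOnP (· == '-') sor.toList) 20 := by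
  unfold loertek_alt PySem.Str.split?
  have : PySem.Chars.split? sor.toList "-".toList
      = some (List.splitOnP (· == '-') sor.toList) := by
    unfold PySem.Chars.split?
    rw [if_neg (by decide)]
    rw [show ("-".toList : List Char) = ['-'] from rfl, loertek_splitOn_eq]
  rw [this]
  simp only [Option.map_some]
  rw [loertek_enum_foldl]
  norm_num

theorem loertekG_nonpos (X : List (List Char)) (p : Int) (hp : p ≤ 0) :
    loertekG X p = 0 := by
  induction X generalizing p with
  | nil => simp [loertekG]
  | cons q qs ih =>
      simp [loertekG, max_eq_right hp, ih (p - 1) (by omega)]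

theorem loertek_F_eq_G (cs : List Char) (p : Int) (hp : 0 ≤ p) :
    loertekF cs p = loertekG (List.splitOnP (· == '-') cs) p := by
  induction cs generalizing p with
  | nil => simp [loertekF, List.splitOnP_nil, loertekG]
  | cons c t ih =>
      by_cases hc : c = '-'
      · subst hc
        rw [List.splitOnP_cons]
        simp only [beq_self_eq_true, if_pos]
        by_cases hp0 : (0 : Int) < p
        · rw [show loertekF ('-' :: t) p = loertekF t (p + -1) from by
              simp [loertekF, hp0]]
          simp only [loertekG]
          rw [ih (p + -1) (by omega)]
          have h2 : p + -1 = p - 1 := by ring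
          rw [h2]
          simp [max_eq_left hp]
        · have hpz : p = 0 := by omega
          subst hpz
          simp only [loertekF, loertekG]
          rw [if_neg (by simp)]
          rw [ih 0 le_rfl, loertekG_nonpos _ _ le_rfl,
              loertekG_nonpos _ _ (by omega)]
          simp
      · rw [List.splitOnP_cons]
        simp only [beq_iff_eq, if_neg hc]
        rw [show loertekF (c :: t) p = p + loertekF t p from by
            simp [loertekF, hc]]
        rcases hX : List.splitOnP (· == '-') t with _ | ⟨q, qs⟩
        · exact absurd hX (List.splitOnP_ne_nil _ _)
        · rw [ih p hp]
          simp only [hX, List.modifyHead, loertekG, List.length_cons,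
            max_eq_left hp]
          push_cast
          ring

-- ===== VERDICT (by name: the statement is the Claim_ definition above) =====
theorem loertek_spec : Claim_equal_loertek := by
  intro sor _
  unfold Spec_loertek
  rw [loertek_eq_F, loertek_alt_eq_G, loertek_F_eq_G _ _ (by omega)]
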